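-- pv_equiv track=rewrite | github.com/gu-dsan6725/spring-2026-a03-RX67-RX67 | part_01/core/router.py | _bonus_heuristics
-- ===== SOURCE A (Python) =====
-- def _bonus_heuristics(route_name: str, q_norm: str) -> int:
--     """
--     Small route-specific nudges to reduce common confusions.
--     Keep this conservative—do not overfit.
--     """
--     bonus = 0
--
--     if route_name == "api_endpoints":
--         # If they explicitly ask to "list endpoints/routes/paths", that's strong.
--         if any(x in q_norm for x in ["list endpoints", "api endpoints", "what routes", "routes are", "paths are"]):
--             bonus += 3
--         # Mention of scopes often co-occurs with endpoints questions.
--         if "scope" in q_norm or "scopes" in q_norm: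
--             bonus += 2
--
--     if route_name == "auth_flow":
--         # If they ask about "flow" or "authorization flow", treat as strong.
--         if "auth flow" in q_norm or "authentication flow" in q_norm or "authorization flow" in q_norm:
--             bonus += 4
--         # Token/jwt/bearer are good indicators for auth flow.
--         if any(x in q_norm for x in ["jwt", "bearer", "token validation", "validate token", "decode token"]):
--             bonus += 2
--
--     if route_name == "add_oauth_provider":
--         # "add support", "new provider", or a concrete provider name is very specific.
--         if any(x in q_norm for x in ["add oauth", "new oauth", "add provider", "new provider", "okta", "oidc", "openid"]):
--             bonus += 5
--
--     if route_name == "deps":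
--         if any(x in q_norm for x in ["pyproject", "requirements", "package.json", "dependencies", "devdependencies"]):
--             bonus += 2
--
--     if route_name == "entrypoint":
--         if any(x in q_norm for x in ["entry point", "entrypoint", "startup", "how to run", "uvicorn", "dockerfile", "docker-compose"]):
--             bonus += 2
--
--     if route_name == "repo_types":
--         if any(x in q_norm for x in ["file types", "extensions", "languages used", "what languages"]):
--             bonus += 2
--
--     return bonus
-- ===== SOURCE B (Python) =====
-- # Flat single-pass rewrite: one list of (route, group, keyword, points) rows scanned once,
-- # with a 'fired' set of group ids replacing the per-group any() checks.
-- ROWS = [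
--     ("api_endpoints", 1, "list endpoints", 3),
--     ("api_endpoints", 1, "api endpoints", 3),
--     ("api_endpoints", 1, "what routes", 3),
--     ("api_endpoints", 1, "routes are", 3),
--     ("api_endpoints", 1, "paths are", 3),
--     ("api_endpoints", 2, "scope", 2),
--     ("api_endpoints", 2, "scopes", 2),
--     ("auth_flow", 3, "auth flow", 4),
--     ("auth_flow", 3, "authentication flow", 4),
--     ("auth_flow", 3, "authorization flow", 4),
--     ("auth_flow", 4, "jwt", 2),
--     ("auth_flow", 4, "bearer", 2),
--     ("auth_flow", 4, "token validation", 2),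
--     ("auth_flow", 4, "validate token", 2),
--     ("auth_flow", 4, "decode token", 2),
--     ("add_oauth_provider", 5, "add oauth", 5),
--     ("add_oauth_provider", 5, "new oauth", 5),
--     ("add_oauth_provider", 5, "add provider", 5),
--     ("add_oauth_provider", 5, "new provider", 5),
--     ("add_oauth_provider", 5, "okta", 5),
--     ("add_oauth_provider", 5, "oidc", 5),
--     ("add_oauth_provider", 5, "openid", 5),
--     ("deps", 6, "pyproject", 2),
--     ("deps", 6, "requirements", 2),
--     ("deps", 6, "package.json", 2),
--     ("deps", 6, "dependencies", 2),
--     ("deps", 6, "devdependencies", 2),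
--     ("entrypoint", 7, "entry point", 2),
--     ("entrypoint", 7, "entrypoint", 2),
--     ("entrypoint", 7, "startup", 2),
--     ("entrypoint", 7, "how to run", 2),
--     ("entrypoint", 7, "uvicorn", 2),
--     ("entrypoint", 7, "dockerfile", 2),
--     ("entrypoint", 7, "docker-compose", 2),
--     ("repo_types", 8, "file types", 2),
--     ("repo_types", 8, "extensions", 2),
--     ("repo_types", 8, "languages used", 2),
--     ("repo_types", 8, "what languages", 2),
-- ]
--
--
-- def _bonus_heuristics(route_name: str, q_norm: str) -> int:
--     bonus = 0
--     fired = set()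
--     for route, gid, kw, pts in ROWS:
--         if route == route_name and gid not in fired and kw in q_norm:
--             bonus += pts
--             fired.add(gid)
--     return bonus
-- ===== Notes on version B (the rewrite author's own statement) =====
-- stated objective: alternative
-- what changed: Replaced the six route-specific if-blocks with their nested any() scans by a single flat pass over one list of (route, group, keyword, points) rows, using a 'fired' set of group ids so each bonus group is added at most once; the inner any() loops disappear.
import Mathlib
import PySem

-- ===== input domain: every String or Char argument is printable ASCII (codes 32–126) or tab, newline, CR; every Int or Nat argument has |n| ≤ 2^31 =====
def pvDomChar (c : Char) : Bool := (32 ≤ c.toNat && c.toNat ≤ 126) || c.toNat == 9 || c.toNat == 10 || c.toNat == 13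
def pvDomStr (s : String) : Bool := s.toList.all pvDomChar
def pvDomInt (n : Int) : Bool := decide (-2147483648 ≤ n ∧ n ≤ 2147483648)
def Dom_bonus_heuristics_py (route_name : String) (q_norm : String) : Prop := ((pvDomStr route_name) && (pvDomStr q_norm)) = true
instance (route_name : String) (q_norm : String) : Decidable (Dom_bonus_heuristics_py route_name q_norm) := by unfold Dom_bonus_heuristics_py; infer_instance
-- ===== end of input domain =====

-- B replaces A's six route if-blocks with nested any() scans by ONE flat pass over a list of
-- (route, group, keyword, points) rows, guarded by a 'fired' set of group ids (objective: alternative).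

-- ===== PORT A =====
def bonus_heuristics_py (route_name : String) (q_norm : String) : Int :=
  let bonus : Int := 0
  let bonus :=
    if route_name = "api_endpoints" then
      let bonus := if ["list endpoints", "api endpoints", "what routes", "routes are", "paths are"].any
          (fun x => PySem.Str.isIn x q_norm) then bonus + 3 else bonus
      let bonus := if PySem.Str.isIn "scope" q_norm || PySem.Str.isIn "scopes" q_norm then bonus + 2 else bonus
      bonus
    else bonus
  let bonus :=
    if route_name = "auth_flow" then
      let bonus := if PySem.Str.isIn "auth flow" q_norm || PySem.Str.isIn "authentication flow" q_norm ||
          PySem.Str.isIn "authorization flow" q_norm then bonus + 4 else bonus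
      let bonus := if ["jwt", "bearer", "token validation", "validate token", "decode token"].any
          (fun x => PySem.Str.isIn x q_norm) then bonus + 2 else bonus
      bonus
    else bonus
  let bonus :=
    if route_name = "add_oauth_provider" then
      if ["add oauth", "new oauth", "add provider", "new provider", "okta", "oidc", "openid"].any
          (fun x => PySem.Str.isIn x q_norm) then bonus + 5 else bonus
    else bonus
  let bonus :=
    if route_name = "deps" then
      if ["pyproject", "requirements", "package.json", "dependencies", "devdependencies"].any
          (fun x => PySem.Str.isIn x q_norm) then bonus + 2 else bonus
    else bonus
  let bonus :=
    if route_name = "entrypoint" then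
      if ["entry point", "entrypoint", "startup", "how to run", "uvicorn", "dockerfile", "docker-compose"].any
          (fun x => PySem.Str.isIn x q_norm) then bonus + 2 else bonus
    else bonus
  let bonus :=
    if route_name = "repo_types" then
      if ["file types", "extensions", "languages used", "what languages"].any
          (fun x => PySem.Str.isIn x q_norm) then bonus + 2 else bonus
    else bonus
  bonus

-- ===== PORT B =====
-- the module-level ROWS list of Source B: (route, group id, keyword, points)
def pvRows : List (String × Int × String × Int) :=
  [ ("api_endpoints", 1, "list endpoints", 3)
  , ("api_endpoints", 1, "api endpoints", 3)
  , ("api_endpoints", 1, "what routes", 3)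
  , ("api_endpoints", 1, "routes are", 3)
  , ("api_endpoints", 1, "paths are", 3)
  , ("api_endpoints", 2, "scope", 2)
  , ("api_endpoints", 2, "scopes", 2)
  , ("auth_flow", 3, "auth flow", 4)
  , ("auth_flow", 3, "authentication flow", 4)
  , ("auth_flow", 3, "authorization flow", 4)
  , ("auth_flow", 4, "jwt", 2)
  , ("auth_flow", 4, "bearer", 2)
  , ("auth_flow", 4, "token validation", 2)
  , ("auth_flow", 4, "validate token", 2)
  , ("auth_flow", 4, "decode token", 2)
  , ("add_oauth_provider", 5, "add oauth", 5)
  , ("add_oauth_provider", 5, "new oauth", 5)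
  , ("add_oauth_provider", 5, "add provider", 5)
  , ("add_oauth_provider", 5, "new provider", 5)
  , ("add_oauth_provider", 5, "okta", 5)
  , ("add_oauth_provider", 5, "oidc", 5)
  , ("add_oauth_provider", 5, "openid", 5)
  , ("deps", 6, "pyproject", 2)
  , ("deps", 6, "requirements", 2)
  , ("deps", 6, "package.json", 2)
  , ("deps", 6, "dependencies", 2)
  , ("deps", 6, "devdependencies", 2)
  , ("entrypoint", 7, "entry point", 2)
  , ("entrypoint", 7, "entrypoint", 2)
  , ("entrypoint", 7, "startup", 2)
  , ("entrypoint", 7, "how to run", 2)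
  , ("entrypoint", 7, "uvicorn", 2)
  , ("entrypoint", 7, "dockerfile", 2)
  , ("entrypoint", 7, "docker-compose", 2)
  , ("repo_types", 8, "file types", 2)
  , ("repo_types", 8, "extensions", 2)
  , ("repo_types", 8, "languages used", 2)
  , ("repo_types", 8, "what languages", 2) ]

-- the body of Source B's for-loop
def pvStep (route_name : String) (q_norm : String) (st : Int × PySem.Set Int) (row : String × Int × String × Int) : Int × PySem.Set Int :=
  if row.1 == route_name && !(PySem.Set.contains st.2 row.2.1) && PySem.Str.isIn row.2.2.1 q_norm
  then (st.1 + row.2.2.2, PySem.Set.add st.2 row.2.1)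
  else st

def bonus_heuristics_py_alt (route_name : String) (q_norm : String) : Int :=
  (pvRows.foldl (pvStep route_name q_norm) ((0 : Int), (PySem.Set.empty : PySem.Set Int))).1

-- ===== PRECONDITION & SPEC =====
def Spec_bonus_heuristics_py (route_name : String) (q_norm : String) (out : Int) : Prop := out = bonus_heuristics_py_alt route_name q_norm
instance (route_name : String) (q_norm : String) (out : Int) : Decidable (Spec_bonus_heuristics_py route_name q_norm out) := by unfold Spec_bonus_heuristics_py; infer_instance

-- ===== CLAIM (what is proved, stated in full; the proofs are below) =====
def Claim_equal_bonus_heuristics_py : Prop := ∀ (route_name : String) (q_norm : String), Dom_bonus_heuristics_py route_name q_norm → Spec_bonus_heuristics_py route_name q_norm (bonus_heuristics_py route_name q_norm)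

-- ===== LEMMAS AND PROOFS =====

-- a keyword group of pvRows: all rows share route, group id and points
def pvG (name : String) (g pts : Int) (kws : List String) : List (String × Int × String × Int) :=
  kws.map (fun kw => (name, g, kw, pts))

theorem pv_rows_groups : pvRows =
    pvG "api_endpoints" 1 3 ["list endpoints", "api endpoints", "what routes", "routes are", "paths are"] ++
    (pvG "api_endpoints" 2 2 ["scope", "scopes"] ++
    (pvG "auth_flow" 3 4 ["auth flow", "authentication flow", "authorization flow"] ++
    (pvG "auth_flow" 4 2 ["jwt", "bearer", "token validation", "validate token", "decode token"] ++
    (pvG "add_oauth_provider" 5 5 ["add oauth", "new oauth", "add provider", "new provider", "okta", "oidc", "openid"] ++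
    (pvG "deps" 6 2 ["pyproject", "requirements", "package.json", "dependencies", "devdependencies"] ++
    (pvG "entrypoint" 7 2 ["entry point", "entrypoint", "startup", "how to run", "uvicorn", "dockerfile", "docker-compose"] ++
     pvG "repo_types" 8 2 ["file types", "extensions", "languages used", "what languages"])))))) := by
  rfl

-- a row whose route differs from route_name is a no-op of the loop body
theorem pv_step_skip (name q : String) (st : Int × PySem.Set Int) (row : String × Int × String × Int)
    (h : row.1 ≠ name) : pvStep name q st row = st := by
  have hb : (row.1 == name) = false := by simp [h]
  simp [pvStep, hb]

theorem pv_skip_route (name q : String) (rows : List (String × Int × String × Int))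
    (h : ∀ r ∈ rows, r.1 ≠ name) : ∀ st, rows.foldl (pvStep name q) st = st := by
  induction rows with
  | nil => intro st; rfl
  | cons r rs ih =>
    intro st
    simp only [List.foldl]
    rw [pv_step_skip _ _ _ _ (h r (by simp))]
    exact ih (fun r hr => h r (by simp [hr])) st

theorem pv_contains_add_self (s : PySem.Set Int) (g : Int) :
    PySem.Set.contains (PySem.Set.add s g) g = true := by
  rw [PySem.Set.contains_iff, PySem.Set.mem_add]
  right; rfl

-- rows of a group whose id has already fired are no-ops
theorem pv_skip_fired (name q : String) (g pts : Int) (kws : List String) :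
    ∀ st : Int × PySem.Set Int, PySem.Set.contains st.2 g = true →
      (kws.map (fun kw => (name, g, kw, pts))).foldl (pvStep name q) st = st := by
  induction kws with
  | nil => intro st _; rfl
  | cons kw kws ih =>
    intro st hc
    have hm : g ∈ st.2 := (PySem.Set.contains_iff _ _).mp hc
    simp only [List.map, List.foldl]
    have hstep : pvStep name q st (name, g, kw, pts) = st := by
      simp [pvStep, hm]
    rw [hstep]
    exact ih st hc

-- a whole unfired group folds to 'add pts once iff any keyword matches'
theorem pv_group (name q : String) (g pts : Int) (kws : List String) :
    ∀ (b : Int) (fired : PySem.Set Int), PySem.Set.contains fired g = false →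
      (kws.map (fun kw => (name, g, kw, pts))).foldl (pvStep name q) (b, fired) =
        if kws.any (fun kw => PySem.Str.isIn kw q) then (b + pts, PySem.Set.add fired g) else (b, fired) := by
  induction kws with
  | nil => intro b fired _; rfl
  | cons kw kws ih =>
    intro b fired hc
    have hm : g ∉ fired := by simpa using hc
    simp only [List.map, List.foldl, List.any]
    by_cases hk : PySem.Chars.isIn kw.toList q.toList = true
    · have hstep : pvStep name q (b, fired) (name, g, kw, pts) = (b + pts, PySem.Set.add fired g) := by
        simp [pvStep, hm, hk]
      rw [hstep, pv_skip_fired name q g pts kws _ (pv_contains_add_self fired g)]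
      simp [hk]
    · have hstep : pvStep name q (b, fired) (name, g, kw, pts) = (b, fired) := by
        simp [pvStep, hk]
      rw [hstep, ih b fired hc]
      simp [hk]

theorem pv_group' (name q : String) (g pts : Int) (kws : List String)
    (b : Int) (fired : PySem.Set Int) (hc : PySem.Set.contains fired g = false) :
    (pvG name g pts kws).foldl (pvStep name q) (b, fired) =
      if kws.any (fun kw => PySem.Str.isIn kw q) then (b + pts, PySem.Set.add fired g) else (b, fired) :=
  pv_group name q g pts kws b fired hc

theorem eq_api (q : String) :
    bonus_heuristics_py "api_endpoints" q = bonus_heuristics_py_alt "api_endpoints" q := by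
  unfold bonus_heuristics_py_alt
  rw [pv_rows_groups]
  simp only [List.foldl_append]
  rw [
    pv_skip_route "api_endpoints" q (pvG "auth_flow" 3 4 ["auth flow", "authentication flow", "authorization flow"]) (by decide),
    pv_skip_route "api_endpoints" q (pvG "auth_flow" 4 2 ["jwt", "bearer", "token validation", "validate token", "decode token"]) (by decide),
    pv_skip_route "api_endpoints" q (pvG "add_oauth_provider" 5 5 ["add oauth", "new oauth", "add provider", "new provider", "okta", "oidc", "openid"]) (by decide),
    pv_skip_route "api_endpoints" q (pvG "deps" 6 2 ["pyproject", "requirements", "package.json", "dependencies", "devdependencies"]) (by decide),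
    pv_skip_route "api_endpoints" q (pvG "entrypoint" 7 2 ["entry point", "entrypoint", "startup", "how to run", "uvicorn", "dockerfile", "docker-compose"]) (by decide),
    pv_skip_route "api_endpoints" q (pvG "repo_types" 8 2 ["file types", "extensions", "languages used", "what languages"]) (by decide),
    pv_group' "api_endpoints" q 1 3 ["list endpoints", "api endpoints", "what routes", "routes are", "paths are"] 0 PySem.Set.empty rfl]
  have n2 : ("api_endpoints" : String) ≠ "auth_flow" := by decide
  have n3 : ("api_endpoints" : String) ≠ "add_oauth_provider" := by decide
  have n4 : ("api_endpoints" : String) ≠ "deps" := by decide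
  have n5 : ("api_endpoints" : String) ≠ "entrypoint" := by decide
  have n6 : ("api_endpoints" : String) ≠ "repo_types" := by decide
  by_cases a1 : (["list endpoints", "api endpoints", "what routes", "routes are", "paths are"].any
      (fun x => PySem.Str.isIn x q)) = true
  · rw [if_pos a1, pv_group' "api_endpoints" q 2 2 _ _ _ (by decide)]
    by_cases a2 : (["scope", "scopes"].any (fun kw => PySem.Str.isIn kw q)) = true
    · rw [if_pos a2]
      simp at a1 a2
      simp [bonus_heuristics_py, n2, n3, n4, n5, n6, a1, a2]
    · rw [if_neg a2]
      simp at a1 a2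
      simp [bonus_heuristics_py, n2, n3, n4, n5, n6, a1, a2]
  · rw [if_neg a1, pv_group' "api_endpoints" q 2 2 _ _ _ (by decide)]
    by_cases a2 : (["scope", "scopes"].any (fun kw => PySem.Str.isIn kw q)) = true
    · rw [if_pos a2]
      simp at a1 a2
      simp [bonus_heuristics_py, n2, n3, n4, n5, n6, a1, a2]
    · rw [if_neg a2]
      simp at a1 a2
      simp [bonus_heuristics_py, n2, n3, n4, n5, n6, a1, a2]

theorem eq_auth (q : String) :
    bonus_heuristics_py "auth_flow" q = bonus_heuristics_py_alt "auth_flow" q := by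
  unfold bonus_heuristics_py_alt
  rw [pv_rows_groups]
  simp only [List.foldl_append]
  rw [
    pv_skip_route "auth_flow" q (pvG "api_endpoints" 1 3 ["list endpoints", "api endpoints", "what routes", "routes are", "paths are"]) (by decide),
    pv_skip_route "auth_flow" q (pvG "api_endpoints" 2 2 ["scope", "scopes"]) (by decide),
    pv_skip_route "auth_flow" q (pvG "add_oauth_provider" 5 5 ["add oauth", "new oauth", "add provider", "new provider", "okta", "oidc", "openid"]) (by decide),
    pv_skip_route "auth_flow" q (pvG "deps" 6 2 ["pyproject", "requirements", "package.json", "dependencies", "devdependencies"]) (by decide),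
    pv_skip_route "auth_flow" q (pvG "entrypoint" 7 2 ["entry point", "entrypoint", "startup", "how to run", "uvicorn", "dockerfile", "docker-compose"]) (by decide),
    pv_skip_route "auth_flow" q (pvG "repo_types" 8 2 ["file types", "extensions", "languages used", "what languages"]) (by decide),
    pv_group' "auth_flow" q 3 4 ["auth flow", "authentication flow", "authorization flow"] 0 PySem.Set.empty rfl]
  have n1 : ("auth_flow" : String) ≠ "api_endpoints" := by decide
  have n3 : ("auth_flow" : String) ≠ "add_oauth_provider" := by decide
  have n4 : ("auth_flow" : String) ≠ "deps" := by decide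
  have n5 : ("auth_flow" : String) ≠ "entrypoint" := by decide
  have n6 : ("auth_flow" : String) ≠ "repo_types" := by decide
  by_cases a1 : (["auth flow", "authentication flow", "authorization flow"].any
      (fun kw => PySem.Str.isIn kw q)) = true
  · rw [if_pos a1, pv_group' "auth_flow" q 4 2 _ _ _ (by decide)]
    by_cases a2 : (["jwt", "bearer", "token validation", "validate token", "decode token"].any
        (fun x => PySem.Str.isIn x q)) = true
    · rw [if_pos a2]
      simp at a1 a2
      rcases a1 with h | h | h <;>
        simp [bonus_heuristics_py, n1, n3, n4, n5, n6, a2, h]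
    · rw [if_neg a2]
      simp at a1 a2
      rcases a1 with h | h | h <;>
        simp [bonus_heuristics_py, n1, n3, n4, n5, n6, a2, h]
  · rw [if_neg a1, pv_group' "auth_flow" q 4 2 _ _ _ (by decide)]
    by_cases a2 : (["jwt", "bearer", "token validation", "validate token", "decode token"].any
        (fun x => PySem.Str.isIn x q)) = true
    · rw [if_pos a2]
      simp at a1 a2
      simp [bonus_heuristics_py, n1, n3, n4, n5, n6, a1, a2]
    · rw [if_neg a2]
      simp at a1 a2
      simp [bonus_heuristics_py, n1, n3, n4, n5, n6, a1, a2]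

theorem eq_oauth (q : String) :
    bonus_heuristics_py "add_oauth_provider" q = bonus_heuristics_py_alt "add_oauth_provider" q := by
  unfold bonus_heuristics_py_alt
  rw [pv_rows_groups]
  simp only [List.foldl_append]
  rw [
    pv_skip_route "add_oauth_provider" q (pvG "api_endpoints" 1 3 ["list endpoints", "api endpoints", "what routes", "routes are", "paths are"]) (by decide),
    pv_skip_route "add_oauth_provider" q (pvG "api_endpoints" 2 2 ["scope", "scopes"]) (by decide),
    pv_skip_route "add_oauth_provider" q (pvG "auth_flow" 3 4 ["auth flow", "authentication flow", "authorization flow"]) (by decide),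
    pv_skip_route "add_oauth_provider" q (pvG "auth_flow" 4 2 ["jwt", "bearer", "token validation", "validate token", "decode token"]) (by decide),
    pv_skip_route "add_oauth_provider" q (pvG "deps" 6 2 ["pyproject", "requirements", "package.json", "dependencies", "devdependencies"]) (by decide),
    pv_skip_route "add_oauth_provider" q (pvG "entrypoint" 7 2 ["entry point", "entrypoint", "startup", "how to run", "uvicorn", "dockerfile", "docker-compose"]) (by decide),
    pv_skip_route "add_oauth_provider" q (pvG "repo_types" 8 2 ["file types", "extensions", "languages used", "what languages"]) (by decide),
    pv_group' "add_oauth_provider" q 5 5 ["add oauth", "new oauth", "add provider", "new provider", "okta", "oidc", "openid"] 0 PySem.Set.empty rfl]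
  have n1 : ("add_oauth_provider" : String) ≠ "api_endpoints" := by decide
  have n2 : ("add_oauth_provider" : String) ≠ "auth_flow" := by decide
  have n4 : ("add_oauth_provider" : String) ≠ "deps" := by decide
  have n5 : ("add_oauth_provider" : String) ≠ "entrypoint" := by decide
  have n6 : ("add_oauth_provider" : String) ≠ "repo_types" := by decide
  by_cases a1 : (["add oauth", "new oauth", "add provider", "new provider", "okta", "oidc", "openid"].any
      (fun x => PySem.Str.isIn x q)) = true
  · rw [if_pos a1]
    simp at a1
    simp [bonus_heuristics_py, n1, n2, n4, n5, n6, a1]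
  · rw [if_neg a1]
    simp at a1
    simp [bonus_heuristics_py, n1, n2, n4, n5, n6, a1]

theorem eq_deps (q : String) :
    bonus_heuristics_py "deps" q = bonus_heuristics_py_alt "deps" q := by
  unfold bonus_heuristics_py_alt
  rw [pv_rows_groups]
  simp only [List.foldl_append]
  rw [
    pv_skip_route "deps" q (pvG "api_endpoints" 1 3 ["list endpoints", "api endpoints", "what routes", "routes are", "paths are"]) (by decide),
    pv_skip_route "deps" q (pvG "api_endpoints" 2 2 ["scope", "scopes"]) (by decide),
    pv_skip_route "deps" q (pvG "auth_flow" 3 4 ["auth flow", "authentication flow", "authorization flow"]) (by decide),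
    pv_skip_route "deps" q (pvG "auth_flow" 4 2 ["jwt", "bearer", "token validation", "validate token", "decode token"]) (by decide),
    pv_skip_route "deps" q (pvG "add_oauth_provider" 5 5 ["add oauth", "new oauth", "add provider", "new provider", "okta", "oidc", "openid"]) (by decide),
    pv_skip_route "deps" q (pvG "entrypoint" 7 2 ["entry point", "entrypoint", "startup", "how to run", "uvicorn", "dockerfile", "docker-compose"]) (by decide),
    pv_skip_route "deps" q (pvG "repo_types" 8 2 ["file types", "extensions", "languages used", "what languages"]) (by decide),
    pv_group' "deps" q 6 2 ["pyproject", "requirements", "package.json", "dependencies", "devdependencies"] 0 PySem.Set.empty rfl]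
  have n1 : ("deps" : String) ≠ "api_endpoints" := by decide
  have n2 : ("deps" : String) ≠ "auth_flow" := by decide
  have n3 : ("deps" : String) ≠ "add_oauth_provider" := by decide
  have n5 : ("deps" : String) ≠ "entrypoint" := by decide
  have n6 : ("deps" : String) ≠ "repo_types" := by decide
  by_cases a1 : (["pyproject", "requirements", "package.json", "dependencies", "devdependencies"].any
      (fun x => PySem.Str.isIn x q)) = true
  · rw [if_pos a1]
    simp at a1
    simp [bonus_heuristics_py, n1, n2, n3, n5, n6, a1]
  · rw [if_neg a1]
    simp at a1
    simp [bonus_heuristics_py, n1, n2, n3, n5, n6, a1]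

theorem eq_entry (q : String) :
    bonus_heuristics_py "entrypoint" q = bonus_heuristics_py_alt "entrypoint" q := by
  unfold bonus_heuristics_py_alt
  rw [pv_rows_groups]
  simp only [List.foldl_append]
  rw [
    pv_skip_route "entrypoint" q (pvG "api_endpoints" 1 3 ["list endpoints", "api endpoints", "what routes", "routes are", "paths are"]) (by decide),
    pv_skip_route "entrypoint" q (pvG "api_endpoints" 2 2 ["scope", "scopes"]) (by decide),
    pv_skip_route "entrypoint" q (pvG "auth_flow" 3 4 ["auth flow", "authentication flow", "authorization flow"]) (by decide),
    pv_skip_route "entrypoint" q (pvG "auth_flow" 4 2 ["jwt", "bearer", "token validation", "validate token", "decode token"]) (by decide),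
    pv_skip_route "entrypoint" q (pvG "add_oauth_provider" 5 5 ["add oauth", "new oauth", "add provider", "new provider", "okta", "oidc", "openid"]) (by decide),
    pv_skip_route "entrypoint" q (pvG "deps" 6 2 ["pyproject", "requirements", "package.json", "dependencies", "devdependencies"]) (by decide),
    pv_skip_route "entrypoint" q (pvG "repo_types" 8 2 ["file types", "extensions", "languages used", "what languages"]) (by decide),
    pv_group' "entrypoint" q 7 2 ["entry point", "entrypoint", "startup", "how to run", "uvicorn", "dockerfile", "docker-compose"] 0 PySem.Set.empty rfl]
  have n1 : ("entrypoint" : String) ≠ "api_endpoints" := by decide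
  have n2 : ("entrypoint" : String) ≠ "auth_flow" := by decide
  have n3 : ("entrypoint" : String) ≠ "add_oauth_provider" := by decide
  have n4 : ("entrypoint" : String) ≠ "deps" := by decide
  have n6 : ("entrypoint" : String) ≠ "repo_types" := by decide
  by_cases a1 : (["entry point", "entrypoint", "startup", "how to run", "uvicorn", "dockerfile", "docker-compose"].any
      (fun x => PySem.Str.isIn x q)) = true
  · rw [if_pos a1]
    simp at a1
    simp [bonus_heuristics_py, n1, n2, n3, n4, n6, a1]
  · rw [if_neg a1]
    simp at a1
    simp [bonus_heuristics_py, n1, n2, n3, n4, n6, a1]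

theorem eq_repo (q : String) :
    bonus_heuristics_py "repo_types" q = bonus_heuristics_py_alt "repo_types" q := by
  unfold bonus_heuristics_py_alt
  rw [pv_rows_groups]
  simp only [List.foldl_append]
  rw [
    pv_skip_route "repo_types" q (pvG "api_endpoints" 1 3 ["list endpoints", "api endpoints", "what routes", "routes are", "paths are"]) (by decide),
    pv_skip_route "repo_types" q (pvG "api_endpoints" 2 2 ["scope", "scopes"]) (by decide),
    pv_skip_route "repo_types" q (pvG "auth_flow" 3 4 ["auth flow", "authentication flow", "authorization flow"]) (by decide),
    pv_skip_route "repo_types" q (pvG "auth_flow" 4 2 ["jwt", "bearer", "token validation", "validate token", "decode token"]) (by decide),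
    pv_skip_route "repo_types" q (pvG "add_oauth_provider" 5 5 ["add oauth", "new oauth", "add provider", "new provider", "okta", "oidc", "openid"]) (by decide),
    pv_skip_route "repo_types" q (pvG "deps" 6 2 ["pyproject", "requirements", "package.json", "dependencies", "devdependencies"]) (by decide),
    pv_skip_route "repo_types" q (pvG "entrypoint" 7 2 ["entry point", "entrypoint", "startup", "how to run", "uvicorn", "dockerfile", "docker-compose"]) (by decide),
    pv_group' "repo_types" q 8 2 ["file types", "extensions", "languages used", "what languages"] 0 PySem.Set.empty rfl]
  have n1 : ("repo_types" : String) ≠ "api_endpoints" := by decide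
  have n2 : ("repo_types" : String) ≠ "auth_flow" := by decide
  have n3 : ("repo_types" : String) ≠ "add_oauth_provider" := by decide
  have n4 : ("repo_types" : String) ≠ "deps" := by decide
  have n5 : ("repo_types" : String) ≠ "entrypoint" := by decide
  by_cases a1 : (["file types", "extensions", "languages used", "what languages"].any
      (fun x => PySem.Str.isIn x q)) = true
  · rw [if_pos a1]
    simp at a1
    simp [bonus_heuristics_py, n1, n2, n3, n4, n5, a1]
  · rw [if_neg a1]
    simp at a1
    simp [bonus_heuristics_py, n1, n2, n3, n4, n5, a1]

theorem pv_routes_all : ∀ r ∈ pvRows,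
    r.1 = "api_endpoints" ∨ r.1 = "auth_flow" ∨ r.1 = "add_oauth_provider" ∨
    r.1 = "deps" ∨ r.1 = "entrypoint" ∨ r.1 = "repo_types" := by
  decide

theorem bonus_heuristics_eq (route_name : String) (q_norm : String) :
    bonus_heuristics_py route_name q_norm = bonus_heuristics_py_alt route_name q_norm := by
  by_cases h1 : route_name = "api_endpoints"
  · subst h1; exact eq_api q_norm
  by_cases h2 : route_name = "auth_flow"
  · subst h2; exact eq_auth q_norm
  by_cases h3 : route_name = "add_oauth_provider"
  · subst h3; exact eq_oauth q_norm
  by_cases h4 : route_name = "deps"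
  · subst h4; exact eq_deps q_norm
  by_cases h5 : route_name = "entrypoint"
  · subst h5; exact eq_entry q_norm
  by_cases h6 : route_name = "repo_types"
  · subst h6; exact eq_repo q_norm
  · have hskip : ∀ r ∈ pvRows, r.1 ≠ route_name := by
      intro r hr
      rcases pv_routes_all r hr with h | h | h | h | h | h <;> rw [h]
      · exact fun e => h1 e.symm
      · exact fun e => h2 e.symm
      · exact fun e => h3 e.symm
      · exact fun e => h4 e.symm
      · exact fun e => h5 e.symm
      · exact fun e => h6 e.symm
    unfold bonus_heuristics_py_alt
    rw [pv_skip_route route_name q_norm pvRows hskip]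
    simp [bonus_heuristics_py, h1, h2, h3, h4, h5, h6]

-- ===== VERDICT (by name: the statement is the Claim_ definition above) =====
theorem bonus_heuristics_py_spec : Claim_equal_bonus_heuristics_py := by
  intro route_name q_norm _
  unfold Spec_bonus_heuristics_py
  exact bonus_heuristics_eq route_name q_norm
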